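-- pv_equiv track=rewrite | github.com/debdattasarkar/DSA | 2. GFG/4. Top 50 DP Problems/39. (M) Skip the work/py_sol.py | minAmount
-- ===== SOURCE A (Python) =====
-- def minAmount(A, n):
--     # Edge case: no tasks
--     if n == 0:
--         return 0
--
--     # Initialize for i = 0
--     # do  : minimum time if we DO task 0  -> pay A[0]
--     # skip: minimum time if we SKIP task 0 -> 0 (skipping a single task is allowed)
--     do = A[0]
--     skip = 0
--
--     # Iterate tasks 1..n-1; each step is O(1), total O(N)
--     for i in range(1, n):
--         # If we do task i, previous can be do or skip; take the cheaper
--         new_do = min(do, skip) + A[i]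
--         # If we skip task i, previous MUST have been done (can't skip twice)
--         new_skip = do
--
--         do, skip = new_do, new_skip
--
--     # Final answer: can end by doing or skipping the last task
--     # Space used is O(1) (only a few scalars).
--     return min(do, skip)
-- ===== SOURCE B (Python) =====
-- def minAmount(A, n):
--     # Complement view: skipped tasks form a no-two-consecutive set and cost nothing,
--     # so the answer is the total of the first n tasks minus the best "house robber"
--     # savings over that prefix, computed by iterating over the prefix list itself.
--     tasks = A[:max(n, 0)]
--     incl = excl = 0
--     for x in tasks:
--         incl, excl = excl + x, max(incl, excl)
--     return sum(tasks) - max(incl, excl)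
-- ===== Notes on version B (the rewrite author's own statement) =====
-- stated objective: alternative
-- what changed: B reformulates the problem via its complement: it materialises the prefix of the first n tasks, iterates over its elements (not indices) with a house-robber DP maximizing the savings of a no-two-consecutive skipped set, and returns the prefix sum minus the maximum savings, instead of A's index-driven two-state min-cost do/skip DP.
-- intended difference: For negative n with a nonempty A whose first entry is negative, A still charges task 0 (its do-state is seeded with A[0] although range(1,n) is empty) and returns min(A[0],0)=A[0]<0, while B returns 0, the cost of the empty selection — the intended value for a nonpositive task count. — e.g. on minAmount([-3], -1): A returns -3, B returns 0
import Mathlib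
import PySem

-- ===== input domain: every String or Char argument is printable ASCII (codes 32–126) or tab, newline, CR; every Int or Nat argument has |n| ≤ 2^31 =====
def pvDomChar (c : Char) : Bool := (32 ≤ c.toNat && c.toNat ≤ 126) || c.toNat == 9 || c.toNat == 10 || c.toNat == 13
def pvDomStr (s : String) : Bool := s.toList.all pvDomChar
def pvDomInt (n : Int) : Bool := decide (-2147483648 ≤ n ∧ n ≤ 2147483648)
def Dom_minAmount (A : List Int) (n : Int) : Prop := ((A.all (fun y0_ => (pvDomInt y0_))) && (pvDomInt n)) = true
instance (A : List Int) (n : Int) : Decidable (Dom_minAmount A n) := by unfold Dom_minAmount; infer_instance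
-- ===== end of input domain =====

-- B reformulates via the complement: it slices off the prefix of the first n tasks and walks its
-- ELEMENTS with a house-robber DP maximizing the savings of a no-two-consecutive skipped set,
-- returning the prefix sum minus the maximum savings — instead of A's index-driven do/skip min DP.

-- ===== PORT A =====
def minAmount (A : List Int) (n : Int) : Int :=
  if n = 0 then 0
  else
    -- do/skip DP over indices 1..n-1, as in the Python
    let st := (PySem.List.pyRange 1 n 1).foldl
      (fun (p : Int × Int) i =>
        (min p.1 p.2 + PySem.List.pyGetD A i 0, p.1))
      (PySem.List.pyGetD A 0 0, 0)
    min st.1 st.2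

-- ===== PORT B =====
def minAmount_alt (A : List Int) (n : Int) : Int :=
  let tasks := PySem.List.slice A none (some (max n 0))
  let st := tasks.foldl (fun (p : Int × Int) x => (p.2 + x, max p.1 p.2)) (0, 0)
  tasks.sum - max st.1 st.2

-- ===== PRECONDITION & SPEC =====
-- Pre_ is exactly the inputs on which the Python A returns: for n ≠ 0 it reads A[0] and
-- A[1..n-1], raising IndexError when A is empty or n exceeds len(A).
def Pre_minAmount (A : List Int) (n : Int) : Prop := n = 0 ∨ (A ≠ [] ∧ n ≤ A.length)
instance (A : List Int) (n : Int) : Decidable (Pre_minAmount A n) := by unfold Pre_minAmount; infer_instance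
def pvWitness_minAmount : List Int × Int := ([4, 1, 3], 3)

-- For negative n with a nonempty A whose first task cost is negative, A still charges task 0
-- (which the count excludes) and returns A[0] < 0, while B returns 0, the cost of the empty
-- selection of tasks — the intended value for a nonpositive task count.
def D_minAmount (A : List Int) (n : Int) : Prop := n < 0 ∧ A ≠ [] ∧ A.headI < 0
instance (A : List Int) (n : Int) : Decidable (D_minAmount A n) := by unfold D_minAmount; infer_instance

def Spec_minAmount (A : List Int) (n : Int) (out : Int) : Prop := ¬ D_minAmount A n → out = minAmount_alt A n
instance (A : List Int) (n : Int) (out : Int) : Decidable (Spec_minAmount A n out) := by unfold Spec_minAmount; infer_instance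

def pvDiffWitness_minAmount : List Int × Int := ([-3], -1)
def pvDiffWitnessOut_minAmount : Int × Int := (-3, 0)

-- ===== CLAIM (what is proved, stated in full; the proofs are below) =====
def Claim_unchanged_minAmount : Prop := ∀ (A : List Int) (n : Int), Dom_minAmount A n → Pre_minAmount A n → Spec_minAmount A n (minAmount A n)
def Claim_changed_minAmount : Prop := Dom_minAmount (pvDiffWitness_minAmount.1) (pvDiffWitness_minAmount.2) ∧ Pre_minAmount (pvDiffWitness_minAmount.1) (pvDiffWitness_minAmount.2) ∧ D_minAmount (pvDiffWitness_minAmount.1) (pvDiffWitness_minAmount.2) ∧ minAmount (pvDiffWitness_minAmount.1) (pvDiffWitness_minAmount.2) = pvDiffWitnessOut_minAmount.1 ∧ minAmount_alt (pvDiffWitness_minAmount.1) (pvDiffWitness_minAmount.2) = pvDiffWitnessOut_minAmount.2 ∧ pvDiffWitnessOut_minAmount.1 ≠ pvDiffWitnessOut_minAmount.2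
def Claim_exact_minAmount : Prop := ∀ (A : List Int) (n : Int), Dom_minAmount A n → Pre_minAmount A n → D_minAmount A n → minAmount A n ≠ minAmount_alt A n

-- ===== LEMMAS AND PROOFS =====

-- Invariant: along any list M, A's (do, skip) state and B's (incl, excl) savings state are
-- complementary with respect to the running total c: do + excl = c and skip + incl = c.
theorem pv_inv (M : List Int) : ∀ (d s i e c : Int), d + e = c → s + i = c →
    ((M.foldl (fun (p : Int × Int) x => (min p.1 p.2 + x, p.1)) (d, s)).1
       + (M.foldl (fun (p : Int × Int) x => (p.2 + x, max p.1 p.2)) (i, e)).2 = c + M.sum)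
    ∧ ((M.foldl (fun (p : Int × Int) x => (min p.1 p.2 + x, p.1)) (d, s)).2
       + (M.foldl (fun (p : Int × Int) x => (p.2 + x, max p.1 p.2)) (i, e)).1 = c + M.sum) := by
  induction M with
  | nil => intro d s i e c h1 h2; simp only [List.foldl_nil, List.sum_nil]; omega
  | cons x M ih =>
    intro d s i e c h1 h2
    simp only [List.foldl_cons, List.sum_cons]
    have := ih (min d s + x) d (e + x) (max i e) (c + x) (by omega) (by omega)
    omega

-- B's value when no task is selected (n ≤ 0): the prefix is empty.
theorem minAmount_alt_nonpos (A : List Int) (n : Int) (h : n ≤ 0) : minAmount_alt A n = 0 := by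
  simp only [minAmount_alt]
  rw [PySem.List.slice_to]
  have h0 : (max n 0).toNat = 0 := by omega
  simp [h0]
  exact le_max_right n 0

-- The main case: 1 ≤ n ≤ len(A).
theorem minAmount_eq_alt_of_pos (A : List Int) (n : Int) (hpos : 0 < n) (hle : n ≤ A.length) :
    minAmount A n = minAmount_alt A n := by
  set L := A.take n.toNat with hL
  have hlen : (L.length : Int) = n := by simp [hL]; omega
  have hLne : L ≠ [] := List.ne_nil_of_length_pos (by omega)
  -- rewrite A's loop body to index into L instead of A
  have hcongrA : (PySem.List.pyRange 1 n 1).foldl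
      (fun (p : Int × Int) i => (min p.1 p.2 + PySem.List.pyGetD A i 0, p.1))
      (PySem.List.pyGetD A 0 0, 0)
    = (PySem.List.pyRange 1 n 1).foldl
      (fun (p : Int × Int) i => (min p.1 p.2 + PySem.List.pyGetD L i 0, p.1))
      (PySem.List.pyGetD A 0 0, 0) := by
    apply PySem.List.foldl_congr_mem
    intro acc j hj
    rw [PySem.List.mem_pyRange_one] at hj
    rw [PySem.List.pyGetD_eq_getElem _ _ (by omega) (by omega),
        PySem.List.pyGetD_eq_getElem _ _ (by omega) (by omega : j < (L.length : Int))]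
    simp [hL, List.getElem_take]
  -- collapse A's index loop into a fold over L.drop 1
  have hfoldA : (PySem.List.pyRange 1 n 1).foldl
      (fun (p : Int × Int) i => (min p.1 p.2 + PySem.List.pyGetD L i 0, p.1))
      (PySem.List.pyGetD A 0 0, 0)
    = (L.drop 1).foldl (fun (p : Int × Int) x => (min p.1 p.2 + x, p.1))
      (PySem.List.pyGetD A 0 0, 0) := by
    rw [← hlen]
    simpa using PySem.List.foldl_pyRange_pyGetD' L 0
      (fun (p : Int × Int) x => (min p.1 p.2 + x, p.1)) (PySem.List.pyGetD A 0 0, 0)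
      (a := 1) (by omega)
  have hhead : PySem.List.pyGetD A 0 0 = L.head hLne := by
    rw [PySem.List.pyGetD_eq_getElem _ _ (by omega) (by omega), List.head_eq_getElem]
    simp [hL, List.getElem_take]
  -- B's prefix is exactly L
  have htasks : PySem.List.slice A none (some (max n 0)) = L := by
    rw [PySem.List.slice_to]
    have hmax : (max n 0).toNat = n.toNat := by omega
    rw [hmax, hL]
    exact le_max_right n 0
  -- compare via the invariant, peeling the head from B's fold
  simp only [minAmount, minAmount_alt, if_neg (show ¬ n = 0 by omega)]
  rw [hcongrA, hfoldA, htasks, hhead]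
  obtain ⟨y, M, hym⟩ := List.exists_cons_of_ne_nil hLne
  have hhy : L.head hLne = y := by simp [hym]
  rw [hhy, hym]
  simp only [List.drop_one, List.tail_cons, List.foldl_cons, List.sum_cons]
  have := pv_inv M y 0 (0 + y) (max 0 0) y (by omega) (by omega)
  omega

-- ===== VERDICT (by name: the statement is the Claim_ definition above) =====
theorem minAmount_spec : Claim_unchanged_minAmount := by
  intro A n _ hpre hnd
  rcases lt_trichotomy n 0 with hneg | hz | hpos
  · -- n < 0: A nonempty with A[0] ≥ 0 (else D_), both sides are 0
    rcases hpre with h | ⟨hne, _⟩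
    · omega
    · have h0 : 0 ≤ A.headI := by
        by_contra h
        exact hnd ⟨hneg, hne, by omega⟩
      obtain ⟨y, M, rfl⟩ := List.exists_cons_of_ne_nil hne
      simp only [List.headI_cons] at h0
      rw [minAmount_alt_nonpos _ _ (by omega)]
      unfold minAmount
      rw [if_neg (by omega), PySem.List.pyRange_one_eq_nil (by omega)]
      simp [PySem.List.pyGetD_zero_cons]
      omega
  · subst hz
    rw [minAmount_alt_nonpos _ _ (by omega)]
    simp [minAmount]
  · rcases hpre with h | ⟨_, hle⟩
    · omega
    · exact minAmount_eq_alt_of_pos A n hpos hle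

theorem minAmount_changed : Claim_changed_minAmount := by unfold Claim_changed_minAmount; decide

theorem minAmount_tight : Claim_exact_minAmount := by
  intro A n _ hpre hd
  obtain ⟨hneg, hne, hh⟩ := hd
  obtain ⟨y, M, rfl⟩ := List.exists_cons_of_ne_nil hne
  simp only [List.headI_cons] at hh
  rw [minAmount_alt_nonpos _ _ (by omega)]
  unfold minAmount
  rw [if_neg (by omega), PySem.List.pyRange_one_eq_nil (by omega)]
  simp [PySem.List.pyGetD_zero_cons]
  omega
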